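-- pv_equiv track=rewrite | github.com/gashawbekele06/Data-Contract-Enforcer | contracts/attributor.py | bfs_upstream
-- ===== SOURCE A (Python) =====
-- from collections import defaultdict, deque
--
-- COLUMN_FILE_MAP = {
--     "confidence": "src/week3/extractor.py",
--     "extracted_facts": "src/week3/extractor.py",
--     "entities": "src/week3/entity_linker.py",
--     "extraction_model": "src/week3/extractor.py",
--     "processing_time_ms": "src/week3/extractor.py",
--     "overall_verdict": "src/week2/courtroom.py",
--     "scores": "src/week2/scorer.py",
--     "sequence_number": "src/week5/aggregate.py",
--     "event_type": "src/week5/event_store.py",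
--     "payload": "src/week5/event_store.py",
--     "nodes": "src/week4/cartographer.py",
--     "edges": "src/week4/graph_builder.py",
--     "total_tokens": "src/week7/contracts/ai_extensions.py",
--     "run_type": "src/week7/contracts/ai_extensions.py",
-- }
--
-- def bfs_upstream(lineage: dict, failing_col: str, max_hops: int = 3) -> list[tuple[str, int]]:
--     """
--     BFS from the file producing the failing column upstream through the lineage graph.
--     Returns list of (node_id, hop_count).
--     """
--     if not lineage:
--         start_file = COLUMN_FILE_MAP.get(failing_col.split(".")[0])
--         if start_file:
--             return [(f"file::{start_file}", 0)]
--         return []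
--
--     edges = lineage.get("edges", [])
--     reverse: dict[str, list[str]] = defaultdict(list)
--     for e in edges:
--         reverse[e["target"]].append(e["source"])
--
--     nodes = {n["node_id"]: n for n in lineage.get("nodes", [])}
--
--     root_file = COLUMN_FILE_MAP.get(failing_col.split(".")[0])
--     if root_file:
--         start_id = f"file::{root_file}"
--     else:
--         candidates = [nid for nid in nodes if failing_col.lower() in nid.lower()]
--         start_id = candidates[0] if candidates else None
--
--     if not start_id:
--         return [(f"file::{root_file}", 0)] if root_file else []
--
--     visited: set[str] = set()
--     queue: deque[tuple[str, int]] = deque([(start_id, 0)])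
--     result: list[tuple[str, int]] = []
--
--     while queue:
--         node_id, hops = queue.popleft()
--         if node_id in visited or hops > max_hops:
--             continue
--         visited.add(node_id)
--         result.append((node_id, hops))
--         for src in reverse.get(node_id, []):
--             queue.append((src, hops + 1))
--
--     return result
-- ===== SOURCE B (Python) =====
-- COLUMN_FILE_MAP = {
--     "confidence": "src/week3/extractor.py",
--     "extracted_facts": "src/week3/extractor.py",
--     "entities": "src/week3/entity_linker.py",
--     "extraction_model": "src/week3/extractor.py",
--     "processing_time_ms": "src/week3/extractor.py",
--     "overall_verdict": "src/week2/courtroom.py",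
--     "scores": "src/week2/scorer.py",
--     "sequence_number": "src/week5/aggregate.py",
--     "event_type": "src/week5/event_store.py",
--     "payload": "src/week5/event_store.py",
--     "nodes": "src/week4/cartographer.py",
--     "edges": "src/week4/graph_builder.py",
--     "total_tokens": "src/week7/contracts/ai_extensions.py",
--     "run_type": "src/week7/contracts/ai_extensions.py",
-- }
--
-- def bfs_upstream(lineage: dict, failing_col: str, max_hops: int = 3) -> list[tuple[str, int]]:
--     """Level-synchronous BFS upstream through the lineage graph: no deque, no
--     defaultdict index — predecessors are read off the edge list directly and the
--     hop count is the outer loop variable."""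
--     if not lineage:
--         start_file = COLUMN_FILE_MAP.get(failing_col.split(".")[0])
--         return [(f"file::{start_file}", 0)] if start_file else []
--
--     edges = lineage.get("edges", [])
--     root_file = COLUMN_FILE_MAP.get(failing_col.split(".")[0])
--     if root_file:
--         start_id = f"file::{root_file}"
--     else:
--         needle = failing_col.lower()
--         start_id = next((nid for nid in (n["node_id"] for n in lineage.get("nodes", []))
--                          if needle in nid.lower()), None)
--     if not start_id:
--         return []
--
--     visited: set[str] = set()
--     result: list[tuple[str, int]] = []
--     frontier = [start_id]
--     hop = 0
--     while frontier and hop <= max_hops: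
--         nxt: list[str] = []
--         for nid in frontier:
--             if nid in visited:
--                 continue
--             visited.add(nid)
--             result.append((nid, hop))
--             nxt.extend(e["source"] for e in edges if e["target"] == nid)
--         frontier = nxt
--         hop += 1
--     return result
-- ===== Notes on version B (the rewrite author's own statement) =====
-- stated objective: alternative
-- what changed: The deque-of-(node,hops) BFS over a defaultdict reverse index is replaced by a level-synchronous BFS: the hop count is the outer loop variable over frontier lists, and each node's predecessors are read off the edge list by a direct scan instead of a prebuilt reverse-adjacency dict.
-- outside the precondition, e.g. on bfs_upstream({'edges': [{'source': 'a'}]}, 'x', 3): A raises KeyError, B returns []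
import Mathlib
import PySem

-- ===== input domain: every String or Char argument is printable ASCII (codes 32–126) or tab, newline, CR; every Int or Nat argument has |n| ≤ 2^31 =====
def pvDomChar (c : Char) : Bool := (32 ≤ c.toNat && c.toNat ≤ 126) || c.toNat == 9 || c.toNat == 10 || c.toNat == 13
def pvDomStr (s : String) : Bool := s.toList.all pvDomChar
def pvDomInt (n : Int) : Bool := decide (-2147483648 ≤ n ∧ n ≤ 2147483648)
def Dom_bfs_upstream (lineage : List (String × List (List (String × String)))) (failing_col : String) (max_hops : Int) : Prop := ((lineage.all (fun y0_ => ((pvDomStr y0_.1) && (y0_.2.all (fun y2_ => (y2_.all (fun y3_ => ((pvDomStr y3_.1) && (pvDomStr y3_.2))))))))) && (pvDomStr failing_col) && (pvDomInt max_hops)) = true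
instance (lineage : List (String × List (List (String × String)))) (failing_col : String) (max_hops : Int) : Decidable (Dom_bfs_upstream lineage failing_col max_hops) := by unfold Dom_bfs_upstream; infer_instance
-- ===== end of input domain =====

-- B replaces A's deque-of-(node,hops) BFS over a defaultdict reverse index by a
-- level-synchronous BFS (the hop count is the outer loop variable) that reads each
-- node's predecessors off the edge list directly; objective: simpler (no deque, no
-- defaultdict), trading a per-expansion scan of the edge list.

-- shared tiny accessors (Python's e["target"], e["source"], n["node_id"]; the
-- default "" is never used under Pre_, which excludes the KeyError inputs)
def pvTgt (e : List (String × String)) : String := (PySem.Dict.mk e).getD "target" ""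
def pvSrc (e : List (String × String)) : String := (PySem.Dict.mk e).getD "source" ""
def pvNodeId (n : List (String × String)) : String := (PySem.Dict.mk n).getD "node_id" ""
-- failing_col.split(".")[0] — split? is never none (separator non-empty), [0] never fails
def pvStartCol (failing_col : String) : String := ((PySem.Str.split? failing_col ".").getD []).headD ""

def COLUMN_FILE_MAP : PySem.Dict String String := PySem.Dict.mk [
  ("confidence", "src/week3/extractor.py"),
  ("extracted_facts", "src/week3/extractor.py"),
  ("entities", "src/week3/entity_linker.py"),
  ("extraction_model", "src/week3/extractor.py"),
  ("processing_time_ms", "src/week3/extractor.py"),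
  ("overall_verdict", "src/week2/courtroom.py"),
  ("scores", "src/week2/scorer.py"),
  ("sequence_number", "src/week5/aggregate.py"),
  ("event_type", "src/week5/event_store.py"),
  ("payload", "src/week5/event_store.py"),
  ("nodes", "src/week4/cartographer.py"),
  ("edges", "src/week4/graph_builder.py"),
  ("total_tokens", "src/week7/contracts/ai_extensions.py"),
  ("run_type", "src/week7/contracts/ai_extensions.py")]

-- ===== PORT A =====
-- A's reverse-adjacency build: for e in edges: reverse[e["target"]].append(e["source"])
def pvRev (edges : List (List (String × String))) : PySem.Dict String (List String) :=
  edges.foldl (fun d e => d.modify (pvTgt e) [] (fun v => v ++ [pvSrc e])) PySem.Dict.empty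

-- A's while-queue loop; fuel makes it total (each pop costs 1; edges.length + 1 pops
-- always suffice, proved below), deque.popleft + appends = head + ++ at the tail
def pvAloop (rev : PySem.Dict String (List String)) (max_hops : Int) :
    Nat → List (String × Int) → PySem.Set String → List (String × Int) → List (String × Int)
  | 0, _, _, res => res
  | _ + 1, [], _, res => res
  | f + 1, (nid, hops) :: q, vis, res =>
    if PySem.Set.contains vis nid || hops > max_hops then
      pvAloop rev max_hops f q vis res
    else
      pvAloop rev max_hops f (q ++ (rev.getD nid []).map (fun s => (s, hops + 1)))
        (PySem.Set.add vis nid) (res ++ [(nid, hops)])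

def bfs_upstream (lineage : List (String × List (List (String × String)))) (failing_col : String) (max_hops : Int) : List (String × Int) :=
  if lineage.isEmpty then
    match COLUMN_FILE_MAP.get? (pvStartCol failing_col) with
    | some sf => [("file::" ++ sf, 0)]
    | none => []
  else
    let lineageD := PySem.Dict.mk lineage
    let edges := lineageD.getD "edges" []
    let rev := pvRev edges
    let nodesD : PySem.Dict String (List (String × String)) :=
      (lineageD.getD "nodes" []).foldl (fun d n => d.insert (pvNodeId n) n) PySem.Dict.empty
    let root_file := COLUMN_FILE_MAP.get? (pvStartCol failing_col)
    let start_id : Option String :=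
      match root_file with
      | some rf => some ("file::" ++ rf)
      | none =>
        (nodesD.keys.filter (fun nid =>
          PySem.Str.isIn (PySem.Str.lower failing_col) (PySem.Str.lower nid))).head?
    -- "if not start_id": None or the empty string are falsy
    match start_id with
    | none => (match root_file with | some rf => [("file::" ++ rf, 0)] | none => [])
    | some sid =>
      if sid = "" then (match root_file with | some rf => [("file::" ++ rf, 0)] | none => [])
      else pvAloop rev max_hops (edges.length + 1) [(sid, 0)] PySem.Set.empty []

-- ===== PORT B =====
-- B's inner for-loop over one frontier level, state (visited, result, next frontier)
def pvBlevel (edges : List (List (String × String))) (hop : Int) :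
    List String → PySem.Set String → List (String × Int) → List String →
    PySem.Set String × List (String × Int) × List String
  | [], vis, res, nxt => (vis, res, nxt)
  | nid :: rest, vis, res, nxt =>
    if PySem.Set.contains vis nid then pvBlevel edges hop rest vis res nxt
    else pvBlevel edges hop rest (PySem.Set.add vis nid) (res ++ [(nid, hop)])
      (nxt ++ (edges.filter (fun e => pvTgt e == nid)).map pvSrc)

-- B's outer while loop: terminates because hop strictly increases towards max_hops
def pvBloop (edges : List (List (String × String))) (max_hops : Int) (hop : Int)
    (frontier : List String) (vis : PySem.Set String) (res : List (String × Int)) :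
    List (String × Int) :=
  if frontier.isEmpty || hop > max_hops then res
  else
    let s := pvBlevel edges hop frontier vis res []
    pvBloop edges max_hops (hop + 1) s.2.2 s.1 s.2.1
termination_by (max_hops + 1 - hop).toNat
decreasing_by simp_all

def bfs_upstream_alt (lineage : List (String × List (List (String × String)))) (failing_col : String) (max_hops : Int) : List (String × Int) :=
  if lineage.isEmpty then
    match COLUMN_FILE_MAP.get? (pvStartCol failing_col) with
    | some sf => [("file::" ++ sf, 0)]
    | none => []
  else
    let lineageD := PySem.Dict.mk lineage
    let edges := lineageD.getD "edges" []
    let start_id : Option String :=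
      match COLUMN_FILE_MAP.get? (pvStartCol failing_col) with
      | some rf => some ("file::" ++ rf)
      | none =>
        (((lineageD.getD "nodes" []).map pvNodeId).filter (fun nid =>
          PySem.Str.isIn (PySem.Str.lower failing_col) (PySem.Str.lower nid))).head?
    match start_id with
    | none => []
    | some sid => if sid = "" then [] else pvBloop edges max_hops 0 [sid] PySem.Set.empty []

-- ===== PRECONDITION & SPEC =====
-- Pre_ excludes exactly the inputs where Python A raises KeyError: a non-empty
-- lineage whose "edges" entries lack "target"/"source" or whose "nodes" entries
-- lack "node_id".
def Pre_bfs_upstream (lineage : List (String × List (List (String × String)))) (failing_col : String) (max_hops : Int) : Prop :=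
  lineage = [] ∨
    ((((PySem.Dict.mk lineage).getD "edges" []).all (fun e =>
        (PySem.Dict.mk e).contains "target" && (PySem.Dict.mk e).contains "source")
      && ((PySem.Dict.mk lineage).getD "nodes" []).all (fun n =>
        (PySem.Dict.mk n).contains "node_id")) = true)
instance (lineage : List (String × List (List (String × String)))) (failing_col : String) (max_hops : Int) : Decidable (Pre_bfs_upstream lineage failing_col max_hops) := by unfold Pre_bfs_upstream; infer_instance

def pvWitness_bfs_upstream : (List (String × List (List (String × String)))) × String × Int :=
  ([("edges", [[("target", "n1"), ("source", "n2")]]), ("nodes", [[("node_id", "n1")]])], "n1", 3)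

def Spec_bfs_upstream (lineage : List (String × List (List (String × String)))) (failing_col : String) (max_hops : Int) (out : List (String × Int)) : Prop := out = bfs_upstream_alt lineage failing_col max_hops
instance (lineage : List (String × List (List (String × String)))) (failing_col : String) (max_hops : Int) (out : List (String × Int)) : Decidable (Spec_bfs_upstream lineage failing_col max_hops out) := by unfold Spec_bfs_upstream; infer_instance

-- ===== CLAIM (what is proved, stated in full; the proofs are below) =====
def Claim_equal_bfs_upstream : Prop := ∀ (lineage : List (String × List (List (String × String)))) (failing_col : String) (max_hops : Int), Dom_bfs_upstream lineage failing_col max_hops → Pre_bfs_upstream lineage failing_col max_hops → Spec_bfs_upstream lineage failing_col max_hops (bfs_upstream lineage failing_col max_hops)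

-- ===== LEMMAS AND PROOFS =====

-- the potential: number of edges whose target is still unvisited (bounds A's queue work)
def pvW (edges : List (List (String × String))) (vis : PySem.Set String) : Nat :=
  (edges.filter (fun e => !(PySem.Set.contains vis (pvTgt e)))).length

theorem pvAloop_nil (rev : PySem.Dict String (List String)) (mh : Int) (f : Nat)
    (vis : PySem.Set String) (res : List (String × Int)) :
    pvAloop rev mh f [] vis res = res := by
  cases f <;> rfl

theorem pvRev_getD (edges : List (List (String × String))) (nid : String) :
    (pvRev edges).getD nid [] = (edges.filter (fun e => pvTgt e == nid)).map pvSrc := by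
  have h : pvRev edges = (edges.map (fun e => (pvTgt e, pvSrc e))).foldl
      (fun d p => d.modify p.1 [] (fun v => v ++ [p.2])) PySem.Dict.empty := by
    rw [List.foldl_map]; rfl
  rw [h, PySem.Dict.getD_foldl_modify_append, PySem.Dict.getD_empty]
  simp [List.filter_map, Function.comp_def, List.map_map]

theorem pvAloop_drain (rev : PySem.Dict String (List String)) (mh h : Int) (hlt : mh < h)
    (frontier : List String) (f : Nat) (vis : PySem.Set String) (res : List (String × Int)) :
    pvAloop rev mh (frontier.length + f) (frontier.map (fun x => (x, h))) vis res = res := by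
  induction frontier generalizing vis res with
  | nil => cases f <;> rfl
  | cons x xs ih =>
    have : (x :: xs).length + f = (xs.length + f) + 1 := by simp; omega
    rw [this]
    simp only [List.map_cons, pvAloop]
    rw [if_pos (by simp [hlt])]
    exact ih vis res

theorem pvAloop_level (edges : List (List (String × String))) (mh h : Int) (hle : h ≤ mh)
    (frontier : List String) (f : Nat) (vis : PySem.Set String) (res : List (String × Int))
    (nxt : List String) :
    pvAloop (pvRev edges) mh (frontier.length + f)
        (frontier.map (fun x => (x, h)) ++ nxt.map (fun x => (x, h + 1))) vis res =
      pvAloop (pvRev edges) mh f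
        ((pvBlevel edges h frontier vis res nxt).2.2.map (fun x => (x, h + 1)))
        (pvBlevel edges h frontier vis res nxt).1 (pvBlevel edges h frontier vis res nxt).2.1 := by
  induction frontier generalizing vis res nxt with
  | nil => simp [pvBlevel]
  | cons x xs ih =>
    have hf : (x :: xs).length + f = (xs.length + f) + 1 := by simp; omega
    rw [hf]
    simp only [List.map_cons, List.cons_append, pvAloop]
    by_cases hv : PySem.Set.contains vis x = true
    · have hm : x ∈ vis := (PySem.Set.contains_iff vis x).mp hv
      rw [if_pos (by simp; exact Or.inl hm)]
      simp only [pvBlevel, hv, if_pos]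
      exact ih vis res nxt
    · have hm : x ∉ vis := fun hx => hv ((PySem.Set.contains_iff vis x).mpr hx)
      rw [if_neg (by simp; exact ⟨hm, by omega⟩)]
      simp only [pvBlevel, hv]
      rw [if_neg (by simp)]
      rw [pvRev_getD]
      have hq : (xs.map (fun x => (x, h)) ++ nxt.map (fun x => (x, h + 1))) ++
          ((edges.filter (fun e => pvTgt e == x)).map pvSrc).map (fun s => (s, h + 1)) =
          xs.map (fun x => (x, h)) ++ (nxt ++ (edges.filter (fun e => pvTgt e == x)).map pvSrc).map (fun x => (x, h + 1)) := by
        simp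
      rw [hq]
      exact ih _ _ _

theorem pvW_add (edges : List (List (String × String))) (vis : PySem.Set String) (nid : String)
    (hni : PySem.Set.contains vis nid = false) :
    pvW edges (PySem.Set.add vis nid) + ((edges.filter (fun e => pvTgt e == nid)).map pvSrc).length
      = pvW edges vis := by
  simp only [List.length_map]
  induction edges with
  | nil => rfl
  | cons e es ih =>
    simp only [pvW, List.filter_cons] at *
    by_cases h1 : pvTgt e = nid
    · rw [h1]
      have hca : PySem.Set.contains (PySem.Set.add vis nid) nid = true :=
        (PySem.Set.contains_iff _ _).mpr ((PySem.Set.mem_add vis nid nid).mpr (Or.inr rfl))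
      simp only [hca, hni, BEq.rfl, Bool.not_true, Bool.not_false, Bool.false_eq_true,
        not_false_iff, if_neg, if_pos, if_true, if_false, List.length_cons]
      omega
    · have hca : PySem.Set.contains (PySem.Set.add vis nid) (pvTgt e)
          = PySem.Set.contains vis (pvTgt e) := by
        rcases Bool.eq_false_or_eq_true (PySem.Set.contains vis (pvTgt e)) with hb | hb
        · rw [hb]
          exact (PySem.Set.contains_iff _ _).mpr
            ((PySem.Set.mem_add vis nid (pvTgt e)).mpr (Or.inl ((PySem.Set.contains_iff _ _).mp hb)))
        · rw [hb]
          apply Bool.eq_false_iff.mpr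
          intro hc
          rcases (PySem.Set.mem_add vis nid (pvTgt e)).mp ((PySem.Set.contains_iff _ _).mp hc) with hm | hm
          · rw [(PySem.Set.contains_iff _ _).mpr hm] at hb; simp at hb
          · exact h1 hm
      have hbeq : (pvTgt e == nid) = false := by simp [h1]
      rw [hca, hbeq]
      rcases Bool.eq_false_or_eq_true (PySem.Set.contains vis (pvTgt e)) with hb | hb <;>
        simp only [hb, Bool.not_true, Bool.not_false, if_neg, if_pos, Bool.false_eq_true,
          not_false_iff, if_true, if_false, List.length_cons] <;> omega

theorem pvBlevel_potential (edges : List (List (String × String))) (h : Int)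
    (frontier : List String) (vis : PySem.Set String) (res : List (String × Int))
    (nxt : List String) :
    (pvBlevel edges h frontier vis res nxt).2.2.length + pvW edges (pvBlevel edges h frontier vis res nxt).1
      ≤ nxt.length + pvW edges vis := by
  induction frontier generalizing vis res nxt with
  | nil => simp [pvBlevel]
  | cons x xs ih =>
    simp only [pvBlevel]
    by_cases hv : PySem.Set.contains vis x = true
    · simp only [hv, if_pos]; exact ih vis res nxt
    · simp only [hv, if_neg, Bool.false_eq_true, not_false_iff]
      calc (pvBlevel edges h xs (PySem.Set.add vis x) (res ++ [(x, h)]) (nxt ++ (edges.filter (fun e => pvTgt e == x)).map pvSrc)).2.2.length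
            + pvW edges (pvBlevel edges h xs (PySem.Set.add vis x) (res ++ [(x, h)]) (nxt ++ (edges.filter (fun e => pvTgt e == x)).map pvSrc)).1
          ≤ (nxt ++ (edges.filter (fun e => pvTgt e == x)).map pvSrc).length + pvW edges (PySem.Set.add vis x) := ih _ _ _
        _ = nxt.length + (pvW edges (PySem.Set.add vis x) + ((edges.filter (fun e => pvTgt e == x)).map pvSrc).length) := by
            simp [List.length_append]; omega
        _ = nxt.length + pvW edges vis := by
            rw [pvW_add edges vis x (Bool.eq_false_iff.mpr hv)]

theorem pvAB_loop (edges : List (List (String × String))) (mh : Int) (n : Nat) :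
    ∀ (h : Int) (frontier : List String) (vis : PySem.Set String) (res : List (String × Int)) (f : Nat),
      (mh + 1 - h).toNat = n → frontier.length + pvW edges vis ≤ f →
      pvAloop (pvRev edges) mh f (frontier.map (fun x => (x, h))) vis res =
        pvBloop edges mh h frontier vis res := by
  induction n with
  | zero =>
    intro h frontier vis res f hn hf
    have hgt : mh < h := by omega
    rw [pvBloop]
    rw [if_pos (by simp; omega)]
    have : f = frontier.length + (f - frontier.length) := by omega
    rw [this]
    exact pvAloop_drain _ mh h hgt frontier _ vis res
  | succ n ih =>
    intro h frontier vis res f hn hf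
    have hle : h ≤ mh := by omega
    rw [pvBloop]
    cases frontier with
    | nil =>
      rw [if_pos (by simp)]
      simp only [List.map_nil]
      exact pvAloop_nil _ mh f vis res
    | cons x xs =>
      rw [if_neg (by simp; omega)]
      have hfl : f = (x :: xs).length + (f - (x :: xs).length) := by
        simp at hf ⊢; omega
      rw [hfl]
      have hmap : (x :: xs).map (fun y => (y, h)) = (x :: xs).map (fun y => (y, h)) ++ ([] : List String).map (fun y => (y, h + 1)) := by simp
      rw [hmap, pvAloop_level edges mh h hle (x :: xs) _ vis res []]
      apply ih
      · omega
      · have hpot := pvBlevel_potential edges h (x :: xs) vis res []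
        simp only [List.length_nil, Nat.zero_add] at hpot
        have := hf
        simp only [List.length_cons] at this ⊢
        omega

theorem pvHead_filter_ofList (xs : List String) (P : String → Bool) :
    ((PySem.Set.ofList xs).filter P).head? = (xs.filter P).head? := by
  induction xs with
  | nil => rfl
  | cons x xs ih =>
    rw [PySem.Set.ofList_cons]
    simp only [List.filter_cons]
    by_cases hp : P x = true
    · simp [hp]
    · simp only [hp, Bool.false_eq_true, not_false_iff, if_neg]
      rw [← ih]
      have : ((PySem.Set.ofList xs).discard x).filter P = (PySem.Set.ofList xs).filter P := by
        show (List.filter _ _).filter P = _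
        rw [List.filter_filter]
        apply List.filter_congr
        intro a _
        rcases Bool.eq_false_or_eq_true (P a) with hb | hb
        · rw [hb]; simp
          intro hax; rw [hax] at hb; exact absurd hb (by simp [hp])
        · rw [hb]; simp
      rw [this]

-- ===== VERDICT (by name: the statement is the Claim_ definition above) =====
theorem bfs_upstream_spec : Claim_equal_bfs_upstream := by
  unfold Claim_equal_bfs_upstream
  intro lineage fc mh _ _
  unfold Spec_bfs_upstream
  by_cases hemp : lineage.isEmpty = true
  · simp only [bfs_upstream, bfs_upstream_alt, hemp, if_pos]
  · have hmain : ∀ (edges : List (List (String × String))) (sid : String),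
        pvAloop (pvRev edges) mh (edges.length + 1) [(sid, 0)] PySem.Set.empty []
          = pvBloop edges mh 0 [sid] PySem.Set.empty [] := by
      intro edges sid
      have h1 : [(sid, (0 : Int))] = [sid].map (fun x => (x, (0 : Int))) := rfl
      rw [h1]
      apply pvAB_loop edges mh (mh + 1 - 0).toNat 0 [sid] _ _ _ rfl
      have hw : pvW edges PySem.Set.empty ≤ edges.length := List.length_filter_le _ _
      simp only [List.length_cons, List.length_nil]
      omega
    simp only [bfs_upstream, bfs_upstream_alt, hemp, Bool.false_eq_true, not_false_iff, if_neg]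
    rcases hroot : COLUMN_FILE_MAP.get? (pvStartCol fc) with _ | rf
    · simp only [hroot]
      rw [PySem.Dict.keys_foldl_insert_key, PySem.Dict.keys_empty, PySem.Set.update_nil_left,
        pvHead_filter_ofList]
      rcases hcand : ((((PySem.Dict.mk lineage).getD "nodes" []).map pvNodeId).filter (fun nid =>
          PySem.Str.isIn (PySem.Str.lower fc) (PySem.Str.lower nid))).head? with _ | sid
      · simp [hcand]
      · simp only [hcand]
        by_cases hsid : sid = ""
        · simp [hsid]
        · simp only [hsid, if_neg]
          exact hmain _ _
    · simp only [hroot]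
      rw [if_neg (by simp)]
      exact hmain _ _
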